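-- pv_equiv track=rewrite | github.com/saurav935/DSA-Java-Bootcamp | Leetcode assignments/Arrays/16. Find Numbers with Even Number of Digits.py | check_even_number_of_digits
-- ===== SOURCE A (Python) =====
-- def check_even_number_of_digits(n):
--     count = 0
--     while n > 0:
--         count += 1
--         n = n // 10
--
--     if count != 0 and count % 2 == 0:
--         return True
--     else:
--         return False
-- ===== SOURCE B (Python) =====
-- def check_even_number_of_digits(n):
--     if n <= 0:
--         return False
--     return len(str(n)) % 2 == 0
-- ===== Notes on version B (the rewrite author's own statement) =====
-- stated objective: idiomatic
-- what changed: Replaces the floor-division counting loop with a direct decimal-representation length check len(str(n)) and an early return for non-positive n.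
import Mathlib
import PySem

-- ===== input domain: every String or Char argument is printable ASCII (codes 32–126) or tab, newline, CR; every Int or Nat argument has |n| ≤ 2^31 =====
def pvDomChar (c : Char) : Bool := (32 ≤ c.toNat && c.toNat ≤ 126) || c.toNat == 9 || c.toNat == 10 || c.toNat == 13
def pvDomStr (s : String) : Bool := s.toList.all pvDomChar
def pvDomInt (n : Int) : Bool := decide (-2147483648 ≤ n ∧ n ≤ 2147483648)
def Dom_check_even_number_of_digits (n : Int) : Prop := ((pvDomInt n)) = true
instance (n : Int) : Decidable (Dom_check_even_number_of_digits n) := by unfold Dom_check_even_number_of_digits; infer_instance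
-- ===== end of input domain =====

-- B replaces A's floor-division digit-counting loop by the decimal-string length len(str(n)); same values everywhere.

-- ===== PORT A =====
-- the while loop of A: count += 1; n = n // 10 while n > 0
def pvCountLoop (n count : Int) : Int :=
  if h : n > 0 then
    pvCountLoop (PySem.Int.floordiv n 10) (count + 1)
  else count
termination_by n.toNat
decreasing_by
  rw [PySem.Int.floordiv_eq_ediv_of_pos (by norm_num)]
  omega

def check_even_number_of_digits (n : Int) : Bool :=
  let count := pvCountLoop n 0
  if count ≠ 0 ∧ PySem.Int.mod count 2 = 0 then true else false

-- ===== PORT B =====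
def check_even_number_of_digits_alt (n : Int) : Bool :=
  if n ≤ 0 then false
  else PySem.Int.mod (PySem.Str.len (PySem.Int.toStr n)) 2 = 0

-- ===== PRECONDITION & SPEC =====
def Spec_check_even_number_of_digits (n : Int) (out : Bool) : Prop := out = check_even_number_of_digits_alt n
instance (n : Int) (out : Bool) : Decidable (Spec_check_even_number_of_digits n out) := by unfold Spec_check_even_number_of_digits; infer_instance

-- ===== CLAIM (what is proved, stated in full; the proofs are below) =====
def Claim_equal_check_even_number_of_digits : Prop := ∀ (n : Int), Dom_check_even_number_of_digits n → Spec_check_even_number_of_digits n (check_even_number_of_digits n)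

-- ===== LEMMAS AND PROOFS =====

-- reference digit count on Nat
def pvDigits (m : Nat) : Nat :=
  if h : m < 10 then 1 else pvDigits (m / 10) + 1
decreasing_by omega

theorem pvDigits_pos (m : Nat) : 0 < pvDigits m := by
  unfold pvDigits
  split <;> omega

theorem pvCountLoop_eq (m : Nat) : ∀ (n count : Int), n.toNat = m → 0 < n →
    pvCountLoop n count = count + pvDigits m := by
  induction m using Nat.strong_induction_on with
  | _ m ih =>
    intro n count hm hn
    rw [pvCountLoop, dif_pos hn, PySem.Int.floordiv_eq_ediv_of_pos (by norm_num)]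
    by_cases h10 : n < 10
    · rw [pvCountLoop]
      rw [dif_neg (by omega)]
      unfold pvDigits
      rw [dif_pos (by omega)]
      ring
    · have hq : (n / 10).toNat = m / 10 := by omega
      rw [ih ((n / 10).toNat) (by omega) _ _ rfl (by omega), hq]
      conv_rhs => unfold pvDigits
      rw [dif_neg (by omega)]
      push_cast
      omega

theorem pvCountLoop_nonpos (n count : Int) (h : ¬ n > 0) : pvCountLoop n count = count := by
  rw [pvCountLoop, dif_neg h]

-- length of Nat.toDigits via fuel induction
theorem toDigitsCore_len (f : Nat) : ∀ (m : Nat), m < f →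
    (Nat.toDigitsCore 10 f m []).length = pvDigits m := by
  induction f with
  | zero => intro m h; omega
  | succ f ih =>
    intro m hm
    unfold Nat.toDigitsCore
    by_cases h10 : m < 10
    · rw [if_pos (by omega)]
      unfold pvDigits
      rw [dif_pos h10]
      rfl
    · rw [if_neg (by omega)]
      rw [Nat.toDigitsCore_lens_eq, ih (m / 10) (by omega)]
      conv_rhs => unfold pvDigits
      rw [dif_neg h10]

theorem toDigits_len (m : Nat) : (Nat.toDigits 10 m).length = pvDigits m := by
  unfold Nat.toDigits
  exact toDigitsCore_len (m + 1) m (by omega)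

theorem len_toStr (n : Int) (hn : 0 < n) :
    PySem.Str.len (PySem.Int.toStr n) = (pvDigits n.toNat : Int) := by
  rw [PySem.Int.toStr.eq_1, PySem.Str.len_eq]
  rw [String.toList_ofList]
  unfold PySem.Int.toChars
  rw [if_neg (by omega), toDigits_len]

-- ===== VERDICT (by name: the statement is the Claim_ definition above) =====
theorem check_even_number_of_digits_spec : Claim_equal_check_even_number_of_digits := by
  intro n _
  unfold Spec_check_even_number_of_digits
  simp only [check_even_number_of_digits, check_even_number_of_digits_alt]
  by_cases hn : 0 < n
  · rw [if_neg (show ¬ n ≤ 0 by omega)]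
    rw [pvCountLoop_eq n.toNat n 0 rfl hn, zero_add, len_toStr n hn]
    have hne : (pvDigits n.toNat : Int) ≠ 0 := by
      have := pvDigits_pos n.toNat
      omega
    by_cases he : PySem.Int.mod ((pvDigits n.toNat : Nat) : Int) 2 = 0
    · rw [if_pos ⟨hne, he⟩]
      exact (decide_eq_true he).symm
    · rw [if_neg (by tauto)]
      exact (decide_eq_false he).symm
  · rw [if_pos (show n ≤ 0 by omega), pvCountLoop_nonpos n 0 hn]
    simp
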